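-- pv_equiv track=rewrite | github.com/Roxalis/short-python | count_double_letter.py | count_double_letter
-- ===== SOURCE A (Python) =====
-- def count_double_letter(word):
--     i = 0
--     clist = []
--     while i < len(word) - 1:
--         if word[i] == word[i + 1]:
--             clist += ['1']
--         else:
--             clist += ['0']
--         i += 1
--     s = ''.join(clist)
--     if '10101' in s or '11101' in s or '10111' in s or '11111' in s:
--         return True
--     else:
--         return False
-- ===== SOURCE B (Python) =====
-- def count_double_letter(word):
--     # streaming DP: a, b = chain lengths (stride-2 runs of doubled pairs)
--     # ending at positions i-2 and i-1; a chain of length 3 means the pattern exists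
--     a = b = 0
--     for i in range(len(word) - 1):
--         cur = a + 1 if word[i] == word[i + 1] else 0
--         if cur >= 3:
--             return True
--         a, b = b, cur
--     return False
-- ===== Notes on version B (the rewrite author's own statement) =====
-- stated objective: faster
-- what changed: Replaced A's two-stage pattern search (build a list of '0'/'1' flag characters, join it into a string, then run four substring searches) by a single streaming pass that keeps two stride-2 chain counters and returns True as soon as a chain of three doubled pairs is seen, building no intermediate list or string.
import Mathlib
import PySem

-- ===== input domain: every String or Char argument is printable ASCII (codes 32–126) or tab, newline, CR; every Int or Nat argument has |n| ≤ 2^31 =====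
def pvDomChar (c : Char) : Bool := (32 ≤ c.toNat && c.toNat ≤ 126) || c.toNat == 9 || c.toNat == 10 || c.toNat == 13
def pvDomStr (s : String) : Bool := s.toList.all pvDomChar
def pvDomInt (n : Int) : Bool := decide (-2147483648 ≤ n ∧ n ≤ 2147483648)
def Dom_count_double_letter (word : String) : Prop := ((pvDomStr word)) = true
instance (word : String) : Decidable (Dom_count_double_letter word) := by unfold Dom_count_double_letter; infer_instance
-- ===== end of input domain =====

-- B replaces A's '0'/'1' string building plus four substring searches by one streaming pass with
-- two stride-2 chain counters and early exit (measured faster: no intermediate list/string is built).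

-- ===== PORT A =====
-- the 'while i < len(word) - 1' loop accumulating clist
def cdlLoop (w : List Char) (i : Nat) (clist : List Char) : List Char :=
  if h : i < w.length - 1 then
    cdlLoop w (i + 1)
      (clist ++ [if w[i]'(Nat.lt_of_succ_lt (Nat.add_lt_of_lt_sub h)) = w[i + 1]'(Nat.add_lt_of_lt_sub h) then '1' else '0'])
  else clist
termination_by w.length - 1 - i
decreasing_by exact Nat.sub_succ_lt_self _ _ h

def count_double_letter (word : String) : Bool :=
  -- clist is a list of the single characters '1'/'0'; ''.join(clist) is therefore
  -- exactly that char sequence, so s is clist (string facts stay on the List Char side)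
  let s : List Char := cdlLoop word.toList 0 []
  if PySem.Chars.isIn ['1','0','1','0','1'] s || PySem.Chars.isIn ['1','1','1','0','1'] s
      || PySem.Chars.isIn ['1','0','1','1','1'] s || PySem.Chars.isIn ['1','1','1','1','1'] s
  then true else false

-- ===== PORT B =====
-- the 'for i in range(len(word) - 1)' loop carrying the two chain counters a, b
def cdlB (w : List Char) (i a b : Nat) : Bool :=
  if h : i < w.length - 1 then
    let cur : Nat := if w[i]'(Nat.lt_of_succ_lt (Nat.add_lt_of_lt_sub h)) = w[i + 1]'(Nat.add_lt_of_lt_sub h) then a + 1 else 0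
    if 3 ≤ cur then true else cdlB w (i + 1) b cur
  else false
termination_by w.length - 1 - i
decreasing_by exact Nat.sub_succ_lt_self _ _ h

def count_double_letter_alt (word : String) : Bool := cdlB word.toList 0 0 0

-- ===== PRECONDITION & SPEC =====
def Spec_count_double_letter (word : String) (out : Bool) : Prop := out = count_double_letter_alt word
instance (word : String) (out : Bool) : Decidable (Spec_count_double_letter word out) := by unfold Spec_count_double_letter; infer_instance

-- ===== CLAIM (what is proved, stated in full; the proofs are below) =====
def Claim_equal_count_double_letter : Prop := ∀ (word : String), Dom_count_double_letter word → Spec_count_double_letter word (count_double_letter word)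

-- ===== LEMMAS AND PROOFS =====

-- '1' for a doubled pair, '0' otherwise
def pvEnc (b : Bool) : Char := if b then '1' else '0'

theorem pvEnc_inj (a b : Bool) : (pvEnc a = pvEnc b) ↔ a = b := by
  cases a <;> cases b <;> decide

theorem one_eq_pvEnc (b : Bool) : ('1' = pvEnc b) ↔ b = true := by
  cases b <;> decide

-- the pair-flag list A computes, as a function of the remaining suffix
def pvFlags (l : List Char) : List Char :=
  (l.zip l.tail).map (fun p => pvEnc (p.1 == p.2))

theorem pvFlags_cons (a b : Char) (t : List Char) :
    pvFlags (a :: b :: t) = pvEnc (a == b) :: pvFlags (b :: t) := rfl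

-- loop invariant for A's while loop
theorem cdlLoop_eq (w : List Char) (i : Nat) (acc : List Char) :
    cdlLoop w i acc = acc ++ pvFlags (w.drop i) := by
  rw [cdlLoop]
  split
  · rename_i h
    rw [cdlLoop_eq w (i + 1)]
    have e1 : w.drop i = w[i]'(by omega) :: w[i + 1]'(by omega) :: w.drop (i + 2) := by
      rw [List.drop_eq_getElem_cons (show i < w.length by omega),
          List.drop_eq_getElem_cons (show i + 1 < w.length by omega)]
    have e2 : w.drop (i + 1) = w[i + 1]'(by omega) :: w.drop (i + 2) :=
      List.drop_eq_getElem_cons (by omega)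
    rw [e1, e2, pvFlags_cons]
    simp [pvEnc]
  · rename_i h
    rcases e : w.drop i with _ | ⟨a, t⟩
    · simp [pvFlags]
    · have ht : t = [] := by
        have hl := congrArg List.length e
        simp at hl
        exact List.length_eq_zero_iff.mp (by omega)
      subst ht
      simp [pvFlags]
termination_by w.length - 1 - i

-- a 5-window pattern is a prefix of the encoded list iff the bool list starts true-x-true-y-true
theorem pvWin (l : List Bool) (x y : Bool) :
    (['1', pvEnc x, '1', pvEnc y, '1'] <+: l.map pvEnc) ↔
      ∃ t, l = true :: x :: true :: y :: true :: t := by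
  rcases l with _ | ⟨b0, _ | ⟨b1, _ | ⟨b2, _ | ⟨b3, _ | ⟨b4, t⟩⟩⟩⟩⟩ <;>
    (simp [List.cons_prefix_cons, one_eq_pvEnc, pvEnc_inj]; try tauto)

-- the window condition in index form
theorem pvWindow_iff (d : List Bool) :
    (∃ j, ∃ x y t, d.drop j = true :: x :: true :: y :: true :: t) ↔
      (∃ k, k + 5 ≤ d.length ∧ d.getD k false = true ∧ d.getD (k + 2) false = true ∧ d.getD (k + 4) false = true) := by
  constructor
  · rintro ⟨j, x, y, t, h⟩
    have hlen : j + 5 ≤ d.length := by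
      have := congrArg List.length h
      simp [List.length_drop] at this
      omega
    have hg : ∀ m : Nat, d.getD (j + m) false = (true :: x :: true :: y :: true :: t).getD m false := by
      intro m
      rw [List.getD_eq_getElem?_getD, List.getD_eq_getElem?_getD, ← List.getElem?_drop, h]
    refine ⟨j, hlen, ?_, ?_, ?_⟩
    · have := hg 0; simpa using this
    · exact (hg 2).trans rfl
    · exact (hg 4).trans rfl
  · rintro ⟨k, hk, h0, h2, h4⟩
    refine ⟨k, d.getD (k + 1) false, d.getD (k + 3) false, d.drop (k + 5), ?_⟩
    rw [List.drop_eq_getElem_cons (show k < d.length by omega),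
        List.drop_eq_getElem_cons (show k + 1 < d.length by omega),
        List.drop_eq_getElem_cons (show k + 2 < d.length by omega),
        List.drop_eq_getElem_cons (show k + 3 < d.length by omega),
        List.drop_eq_getElem_cons (show k + 4 < d.length by omega)]
    rw [List.getD_eq_getElem d false (show k < d.length by omega)] at h0
    rw [List.getD_eq_getElem d false (show k + 2 < d.length by omega)] at h2
    rw [List.getD_eq_getElem d false (show k + 4 < d.length by omega)] at h4
    rw [List.getD_eq_getElem d false (show k + 1 < d.length by omega),
        List.getD_eq_getElem d false (show k + 3 < d.length by omega)]
    simp [h0, h2, h4]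

-- the pair list as Bools
def pvD (w : List Char) : List Bool := (w.zip w.tail).map (fun p => p.1 == p.2)

-- four substring searches on the encoded string = the window condition on the bool list
theorem pvKey (d : List Bool) :
    (PySem.Chars.isIn ['1','0','1','0','1'] (d.map pvEnc) || PySem.Chars.isIn ['1','1','1','0','1'] (d.map pvEnc)
      || PySem.Chars.isIn ['1','0','1','1','1'] (d.map pvEnc) || PySem.Chars.isIn ['1','1','1','1','1'] (d.map pvEnc)) = true
    ↔ (∃ k, k + 5 ≤ d.length ∧ d.getD k false = true ∧ d.getD (k + 2) false = true ∧ d.getD (k + 4) false = true) := by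
  rw [← pvWindow_iff]
  simp only [Bool.or_eq_true, ← PySem.Chars.exists_prefix_drop_iff_isIn]
  have lift : ∀ x y : Bool, ∀ j : Nat,
      (['1', pvEnc x, '1', pvEnc y, '1'] <+: (d.map pvEnc).drop j) ↔
        ∃ t, d.drop j = true :: x :: true :: y :: true :: t := by
    intro x y j
    rw [← List.map_drop, pvWin]
  constructor
  · intro h
    rcases h with ((⟨j, hj⟩ | ⟨j, hj⟩) | ⟨j, hj⟩) | ⟨j, hj⟩
    · exact ⟨j, false, false, ((lift false false j).mp hj)⟩
    · exact ⟨j, true, false, ((lift true false j).mp hj)⟩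
    · exact ⟨j, false, true, ((lift false true j).mp hj)⟩
    · exact ⟨j, true, true, ((lift true true j).mp hj)⟩
  · rintro ⟨j, x, y, t, hj⟩
    have hpre := (lift x y j).mpr ⟨t, hj⟩
    cases x <;> cases y
    · exact Or.inl (Or.inl (Or.inl ⟨j, hpre⟩))
    · exact Or.inl (Or.inr ⟨j, hpre⟩)
    · exact Or.inl (Or.inl (Or.inr ⟨j, hpre⟩))
    · exact Or.inr ⟨j, hpre⟩

-- ===== B side: chain predicates =====

-- whether position k is a doubled pair
def pvEqb (w : List Char) (k : Nat) : Bool :=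
  match w.drop k with
  | a :: b :: _ => a == b
  | _ => false

-- a stride-2 run of three doubled pairs ending at k
def pvCh3 (w : List Char) (k : Nat) : Bool :=
  decide (4 <= k) && pvEqb w k && pvEqb w (k - 2) && pvEqb w (k - 4)

theorem pvEqb_eq (w : List Char) (k : Nat) :
    pvEqb w k = if h : k + 1 < w.length then decide (w[k]'(by omega) = w[k + 1]) else false := by
  unfold pvEqb
  by_cases h : k + 1 < w.length
  · rw [dif_pos h]
    rw [List.drop_eq_getElem_cons (show k < w.length by omega),
        List.drop_eq_getElem_cons (show k + 1 < w.length by omega)]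
    rw [Bool.eq_iff_iff]
    simp
  · rw [dif_neg h]
    have hl : (w.drop k).length ≤ 1 := by
      simp [List.length_drop]; omega
    rcases e : w.drop k with _ | ⟨a, _ | ⟨b, t⟩⟩
    · rfl
    · rfl
    · rw [e] at hl; simp at hl

theorem pvD_getD (w : List Char) (k : Nat) : (pvD w).getD k false = pvEqb w k := by
  rw [pvEqb_eq]
  unfold pvD
  by_cases h : k + 1 < w.length
  · have hk : k < ((w.zip w.tail).map (fun p => p.1 == p.2)).length := by
      simp [List.length_zip]; omega
    rw [List.getD_eq_getElem _ _ hk]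
    simp only [dif_pos h]
    simp [List.getElem_zip, List.getElem_tail]
    rw [Bool.eq_iff_iff]
    simp
  · rw [List.getD_eq_default, dif_neg h]
    simp [List.length_zip]; omega

theorem pvCh3_iff (w : List Char) (k : Nat) :
    pvCh3 w k = true ↔ 4 ≤ k ∧ pvEqb w k = true ∧ pvEqb w (k - 2) = true ∧ pvEqb w (k - 4) = true := by
  simp [pvCh3, and_assoc]

-- loop invariant for B's for loop: a, b carry exactly the chain information at i-2 and i-1
theorem cdlB_inv (w : List Char) (i a b : Nat)
    (ha1 : 1 ≤ a ↔ (2 ≤ i ∧ pvEqb w (i - 2) = true))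
    (ha2 : 2 ≤ a ↔ (4 ≤ i ∧ pvEqb w (i - 2) = true ∧ pvEqb w (i - 4) = true))
    (ha3 : a ≤ 2)
    (hb1 : 1 ≤ b ↔ (1 ≤ i ∧ pvEqb w (i - 1) = true))
    (hb2 : 2 ≤ b ↔ (3 ≤ i ∧ pvEqb w (i - 1) = true ∧ pvEqb w (i - 3) = true))
    (hb3 : b ≤ 2) :
    cdlB w i a b = true ↔ ∃ k, i ≤ k ∧ k + 1 < w.length ∧ pvCh3 w k = true := by
  rw [cdlB]
  split
  · rename_i h
    have he : pvEqb w i = decide (w[i]'(by omega) = w[i + 1]'(by omega)) := by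
      rw [pvEqb_eq, dif_pos (show i + 1 < w.length by omega)]
    by_cases hcq : w[i]'(by omega) = w[i + 1]'(by omega)
    · -- the pair at i is doubled: cur = a + 1
      have e0 : pvEqb w i = true := by rw [he]; exact decide_eq_true hcq
      simp only [if_pos hcq]
      by_cases h3 : 3 ≤ a + 1
      · rw [if_pos h3]
        obtain ⟨h4, e1, e2⟩ := ha2.mp (by omega)
        exact iff_of_true rfl ⟨i, le_refl i, by omega, (pvCh3_iff w i).mpr ⟨h4, e0, e1, e2⟩⟩
      · rw [if_neg h3]
        rw [cdlB_inv w (i + 1) b (a + 1)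
              (by rw [hb1, show i + 1 - 2 = i - 1 by omega]; exact and_congr_left' (by omega))
              (by rw [hb2, show i + 1 - 2 = i - 1 by omega, show i + 1 - 4 = i - 3 by omega]
                  exact and_congr_left' (by omega))
              hb3
              (by rw [show i + 1 - 1 = i from rfl, e0]; simp)
              (by rw [show i + 1 - 1 = i from rfl, show i + 1 - 3 = i - 2 by omega, e0]
                  constructor
                  · intro h2
                    obtain ⟨hi, e⟩ := ha1.mp (by omega)
                    exact ⟨by omega, rfl, e⟩
                  · rintro ⟨hi, -, e⟩
                    have := ha1.mpr ⟨by omega, e⟩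
                    omega)
              (by omega)]
        constructor
        · rintro ⟨k, hik, hkl, hk3⟩
          exact ⟨k, by omega, hkl, hk3⟩
        · rintro ⟨k, hik, hkl, hk3⟩
          rcases Nat.eq_or_lt_of_le hik with heq | hl
          · exfalso
            obtain ⟨h4, -, e1, e2⟩ := (pvCh3_iff w k).mp hk3
            rw [← heq] at h4 e1 e2
            exact h3 (by have := ha2.mpr ⟨h4, e1, e2⟩; omega)
          · exact ⟨k, hl, hkl, hk3⟩
    · -- the pair at i is not doubled: cur = 0
      have e0 : pvEqb w i = false := by rw [he]; exact decide_eq_false hcq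
      simp only [if_neg hcq]
      rw [if_neg (show ¬ 3 ≤ 0 by omega)]
      rw [cdlB_inv w (i + 1) b 0
            (by rw [hb1, show i + 1 - 2 = i - 1 by omega]; exact and_congr_left' (by omega))
            (by rw [hb2, show i + 1 - 2 = i - 1 by omega, show i + 1 - 4 = i - 3 by omega]
                exact and_congr_left' (by omega))
            hb3
            (by rw [show i + 1 - 1 = i from rfl, e0]; simp)
            (by rw [show i + 1 - 1 = i from rfl, e0]; simp)
            (by omega)]
      constructor
      · rintro ⟨k, hik, hkl, hk3⟩
        exact ⟨k, by omega, hkl, hk3⟩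
      · rintro ⟨k, hik, hkl, hk3⟩
        rcases Nat.eq_or_lt_of_le hik with heq | hl
        · exfalso
          obtain ⟨-, ec, -, -⟩ := (pvCh3_iff w k).mp hk3
          rw [← heq, e0] at ec
          exact Bool.false_ne_true ec
        · exact ⟨k, hl, hkl, hk3⟩
  · rename_i h
    exact iff_of_false (by simp) (by rintro ⟨k, hik, hkl, -⟩; omega)
termination_by w.length - 1 - i

-- the window condition equals the chain condition
theorem pvBridge (w : List Char) :
    (∃ k, k + 5 ≤ (pvD w).length ∧ (pvD w).getD k false = true ∧ (pvD w).getD (k + 2) false = true ∧ (pvD w).getD (k + 4) false = true)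
    ↔ ∃ k, 0 ≤ k ∧ k + 1 < w.length ∧ pvCh3 w k = true := by
  have hlen : (pvD w).length = w.length - 1 := by
    simp [pvD, List.length_zip]
  constructor
  · rintro ⟨k, hk, h0, h2, h4⟩
    rw [pvD_getD] at h0 h2 h4
    refine ⟨k + 4, by omega, by omega, (pvCh3_iff w (k + 4)).mpr ⟨by omega, by simpa using h4, by simpa using h2, by simpa using h0⟩⟩
  · rintro ⟨k, -, hkl, hk3⟩
    obtain ⟨hk4, e0, e1, e2⟩ := (pvCh3_iff w k).mp hk3
    refine ⟨k - 4, by omega, ?_, ?_, ?_⟩ <;> rw [pvD_getD]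
    · exact e2
    · rwa [show k - 4 + 2 = k - 2 by omega]
    · rwa [show k - 4 + 4 = k by omega]

-- ===== VERDICT (by name: the statement is the Claim_ definition above) =====
theorem count_double_letter_spec : Claim_equal_count_double_letter := by
  intro word _
  unfold Spec_count_double_letter count_double_letter count_double_letter_alt
  have h1 : cdlLoop word.toList 0 [] = (pvD word.toList).map pvEnc := by
    rw [cdlLoop_eq]
    simp [pvFlags, pvD, List.map_map]
  simp only [h1]
  rw [Bool.eq_iff_iff]
  have hB := cdlB_inv word.toList 0 0 0
    ⟨fun h => absurd h (by omega), fun h => absurd h.1 (by omega)⟩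
    ⟨fun h => absurd h (by omega), fun h => absurd h.1 (by omega)⟩
    (by omega)
    ⟨fun h => absurd h (by omega), fun h => absurd h.1 (by omega)⟩
    ⟨fun h => absurd h (by omega), fun h => absurd h.1 (by omega)⟩
    (by omega)
  rw [hB]
  constructor
  · intro h
    have : (PySem.Chars.isIn ['1','0','1','0','1'] ((pvD word.toList).map pvEnc) || PySem.Chars.isIn ['1','1','1','0','1'] ((pvD word.toList).map pvEnc)
      || PySem.Chars.isIn ['1','0','1','1','1'] ((pvD word.toList).map pvEnc) || PySem.Chars.isIn ['1','1','1','1','1'] ((pvD word.toList).map pvEnc)) = true := by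
      by_contra hc
      rw [if_neg] at h
      · exact Bool.false_ne_true h
      · intro hx; exact hc hx
    obtain ⟨k, hk, h0, h2, h4⟩ := (pvKey (pvD word.toList)).mp this
    exact (pvBridge word.toList).mp ⟨k, hk, h0, h2, h4⟩
  · intro h
    rw [if_pos ((pvKey (pvD word.toList)).mpr ((pvBridge word.toList).mpr h))]
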